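-- pv_equiv track=rewrite | github.com/m3hrad/web_developing_exercises | exercises/04_python/keyword_usage.py | keyword_usage
-- ===== SOURCE A (Python) =====
-- def keyword_usage(str, lst):
--     words = str.split();
--     resultList = [];
--     for eachList in lst:
--         if (eachList in words):
--              resultList.append(True);
--         else:
--              resultList.append(False);
--     result = tuple(resultList);
--     return result;
-- ===== SOURCE B (Python) =====
-- def keyword_usage(str, lst):
--     index = {}
--     for i, kw in enumerate(lst):
--         index.setdefault(kw, []).append(i)
--     result = [False] * len(lst)
--     for word in str.split():
--         for i in index.get(word, ()):
--             result[i] = True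
--     return tuple(result)
-- ===== Notes on version B (the rewrite author's own statement) =====
-- stated objective: alternative
-- what changed: Instead of scanning the split word list once per keyword, B builds a dict from keyword to its list of positions, initialises an all-False result, and makes a single pass over the words setting the positions of matching keywords to True; it trades A's repeated list scans for index bookkeeping.
import Mathlib
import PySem

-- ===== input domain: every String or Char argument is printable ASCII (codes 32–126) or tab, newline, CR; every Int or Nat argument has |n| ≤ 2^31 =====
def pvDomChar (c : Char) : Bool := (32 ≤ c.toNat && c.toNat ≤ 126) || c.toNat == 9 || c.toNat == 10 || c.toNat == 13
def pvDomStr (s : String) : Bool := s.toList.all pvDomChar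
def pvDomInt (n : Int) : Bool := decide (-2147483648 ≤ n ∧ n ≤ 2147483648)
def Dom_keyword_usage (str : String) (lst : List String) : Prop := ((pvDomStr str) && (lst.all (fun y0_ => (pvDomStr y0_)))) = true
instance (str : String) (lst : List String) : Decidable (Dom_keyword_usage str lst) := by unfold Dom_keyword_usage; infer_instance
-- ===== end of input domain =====

-- B builds a keyword -> positions index once and makes a single pass over the words (A scans the word list once per keyword); return value only (Python returns a tuple, modelled as List Bool).

-- ===== PORT A =====
def keyword_usage (str : String) (lst : List String) : List Bool :=
  let words := PySem.Str.split₀ str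
  let resultList : List Bool :=
    lst.foldl (fun acc eachList =>
      if words.contains eachList then acc ++ [true] else acc ++ [false]) []
  resultList

-- ===== PORT B =====
-- index.setdefault(kw, []).append(i)  ==  index[kw] = index.get(kw, []) + [i], which is Dict.modify
def kuIndex (lst : List String) : PySem.Dict String (List Int) :=
  (PySem.List.enumerate lst 0).foldl (fun d p => d.modify p.2 [] (· ++ [p.1])) PySem.Dict.empty

def kuSetTrue (r : List Bool) (is : List Int) : List Bool :=
  is.foldl (fun r i => PySem.List.pySetD r i true) r

def keyword_usage_alt (str : String) (lst : List String) : List Bool :=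
  let index := kuIndex lst
  let result := List.replicate lst.length false
  (PySem.Str.split₀ str).foldl (fun r word => kuSetTrue r (index.getD word [])) result

-- ===== PRECONDITION & SPEC =====
def Spec_keyword_usage (str : String) (lst : List String) (out : List Bool) : Prop := out = keyword_usage_alt str lst
instance (str : String) (lst : List String) (out : List Bool) : Decidable (Spec_keyword_usage str lst out) := by unfold Spec_keyword_usage; infer_instance

-- ===== CLAIM (what is proved, stated in full; the proofs are below) =====
def Claim_equal_keyword_usage : Prop := ∀ (str : String) (lst : List String), Dom_keyword_usage str lst → Spec_keyword_usage str lst (keyword_usage str lst)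

-- ===== LEMMAS AND PROOFS =====

-- A's loop is the map of the membership test
theorem kuA_foldl (words : List String) :
    ∀ (l : List String) (acc : List Bool),
      l.foldl (fun acc k => if words.contains k then acc ++ [true] else acc ++ [false]) acc
        = acc ++ l.map (fun k => words.contains k) := by
  intro l
  induction l with
  | nil => simp
  | cons x xs ih =>
    intro acc
    rw [List.foldl_cons]
    by_cases h : words.contains x
    · rw [if_pos h, ih]
      simp at h
      simp [h]
    · rw [if_neg h, ih]
      simp at h
      simp [h]

-- the index dict maps w to the positions of w in lst
theorem kuIndex_getD (lst : List String) (w : String) :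
    (kuIndex lst).getD w []
      = (((PySem.List.enumerate lst 0).filter (fun p => p.2 == w)).map (·.1)) := by
  unfold kuIndex
  have hfm := @List.foldl_map (Int × String) (String × Int) (PySem.Dict String (List Int))
      (fun p => (p.2, p.1)) (fun d p => d.modify p.1 [] (· ++ [p.2]))
      (PySem.List.enumerate lst 0) PySem.Dict.empty
  simp only at hfm
  rw [← hfm, PySem.Dict.getD_foldl_modify_append]
  simp [List.filter_map, Function.comp_def]

theorem mem_enumerate_iff (lst : List String) :
    ∀ (s i : Int) (w : String),
      (i, w) ∈ PySem.List.enumerate lst s ↔ ∃ (j : Nat) (h : j < lst.length), i = s + j ∧ lst[j] = w := by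
  induction lst with
  | nil => simp [PySem.List.enumerate_nil]
  | cons x xs ih =>
    intro s i w
    rw [PySem.List.enumerate_cons, List.mem_cons]
    constructor
    · rintro (h | h)
      · rw [Prod.ext_iff] at h
        obtain ⟨h1, h2⟩ := h
        exact ⟨0, by simp, by simpa using h1, by simpa using h2.symm⟩
      · rcases (ih (s+1) i w).1 h with ⟨j, hj, hi, hw⟩
        exact ⟨j+1, by simp only [List.length_cons]; omega,
          by push_cast at hi ⊢; omega, by simpa using hw⟩
    · rintro ⟨j, hj, hi, hw⟩
      cases j with
      | zero =>
        left
        have h1 : i = s := by omega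
        simp only [List.getElem_cons_zero] at hw
        simp [h1, hw]
      | succ j =>
        right
        exact (ih (s+1) i w).2 ⟨j, by simp only [List.length_cons] at hj; omega,
          by push_cast at hi ⊢; omega, by simpa using hw⟩

theorem mem_kuIndex (lst : List String) (w : String) (j : Nat) (hj : j < lst.length) :
    ((j : Int) ∈ (kuIndex lst).getD w []) ↔ lst[j] = w := by
  rw [kuIndex_getD]
  simp only [List.mem_map, List.mem_filter]
  constructor
  · rintro ⟨⟨i, v⟩, ⟨hmem, hv⟩, hfst⟩
    simp only at hfst hv
    subst hfst
    rcases (mem_enumerate_iff lst 0 j v).1 hmem with ⟨j', hj', hi, hw⟩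
    have hj'' : j' = j := by omega
    subst hj''
    rw [hw]
    exact (beq_iff_eq).1 hv
  · intro hw
    exact ⟨((j : Int), w), ⟨(mem_enumerate_iff lst 0 j w).2 ⟨j, hj, by omega, hw⟩, by simp⟩, rfl⟩

theorem kuIndex_nonneg (lst : List String) (w : String) :
    ∀ i ∈ (kuIndex lst).getD w [], 0 ≤ i := by
  intro i hi
  rw [kuIndex_getD] at hi
  rcases List.mem_map.1 hi with ⟨⟨i', v⟩, hm, h⟩
  rcases (mem_enumerate_iff lst 0 i' v).1 (List.mem_filter.1 hm).1 with ⟨j, hj, hi', _⟩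
  simp only at h; omega

theorem length_kuSetTrue : ∀ (is : List Int) (r : List Bool), (kuSetTrue r is).length = r.length := by
  intro is
  induction is with
  | nil => intro r; rfl
  | cons i is ih => intro r; rw [kuSetTrue, List.foldl_cons, ← kuSetTrue, ih, PySem.List.length_pySetD]

theorem getElem?_kuSetTrue :
    ∀ (is : List Int) (r : List Bool), (∀ i ∈ is, 0 ≤ i) → ∀ (j : Nat), j < r.length →
      (kuSetTrue r is)[j]? = if (j : Int) ∈ is then some true else r[j]? := by
  intro is
  induction is with
  | nil => intro r _ j hj; simp [kuSetTrue]
  | cons i is ih =>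
    intro r hnn j hj
    rw [kuSetTrue, List.foldl_cons, ← kuSetTrue]
    have hi : 0 ≤ i := hnn i (by simp)
    rw [PySem.List.pySetD_of_nonneg r true hi]
    rw [ih _ (fun i hi => hnn i (by simp [hi])) j (by simpa using hj)]
    by_cases hmem : (j : Int) ∈ is
    · simp [hmem]
    · by_cases hij : i.toNat = j
      · have : (j : Int) = i := by omega
        simp [this, hij, hj]
      · have : (j : Int) ≠ i := by omega
        simp [hmem, this, hij]

theorem length_kuFold (lst : List String) :
    ∀ (ws : List String) (r : List Bool),
      (ws.foldl (fun r word => kuSetTrue r ((kuIndex lst).getD word [])) r).length = r.length := by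
  intro ws
  induction ws with
  | nil => intro r; rfl
  | cons w ws ih => intro r; rw [List.foldl_cons, ih, length_kuSetTrue]

theorem getElem?_kuFold (lst : List String) :
    ∀ (ws : List String) (r : List Bool), r.length = lst.length → ∀ (j : Nat) (hj : j < lst.length),
      (ws.foldl (fun r word => kuSetTrue r ((kuIndex lst).getD word [])) r)[j]?
        = some (r.getD j false || ws.contains lst[j]) := by
  intro ws
  induction ws with
  | nil =>
    intro r hr j hj
    simp [List.getD_eq_getElem?_getD, List.getElem?_eq_getElem (by omega : j < r.length)]
  | cons w ws ih =>
    intro r hr j hj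
    rw [List.foldl_cons]
    rw [ih _ (by rw [length_kuSetTrue]; exact hr) j hj]
    have hset := getElem?_kuSetTrue ((kuIndex lst).getD w []) r (kuIndex_nonneg lst w) j (by omega)
    have hgd : (kuSetTrue r ((kuIndex lst).getD w [])).getD j false
        = (if lst[j] = w then true else r.getD j false) := by
      by_cases hw : lst[j] = w
      · have hmem : (j : Int) ∈ (kuIndex lst).getD w [] := (mem_kuIndex lst w j hj).2 hw
        rw [List.getD_eq_getElem?_getD, hset, if_pos hmem, if_pos hw]
        rfl
      · have hmem : ¬ ((j : Int) ∈ (kuIndex lst).getD w []) := fun h => hw ((mem_kuIndex lst w j hj).1 h)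
        rw [List.getD_eq_getElem?_getD, hset, if_neg hmem, if_neg hw, List.getD_eq_getElem?_getD]
    rw [hgd]
    by_cases hw : lst[j] = w
    · simp [hw]
    · simp [hw]

-- ===== VERDICT (by name: the statement is the Claim_ definition above) =====
theorem keyword_usage_spec : Claim_equal_keyword_usage := by
  intro str lst _
  unfold Spec_keyword_usage
  simp only [keyword_usage, keyword_usage_alt]
  rw [kuA_foldl]
  apply List.ext_getElem?
  intro j
  by_cases hj : j < lst.length
  · rw [getElem?_kuFold lst _ _ (by simp) j hj]
    simp [List.getD_eq_getElem?_getD, hj]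
  · rw [List.getElem?_eq_none (by simpa using (by omega : lst.length ≤ j)),
      List.getElem?_eq_none]
    rw [length_kuFold]
    simp; omega
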